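-- pv_equiv track=rewrite | github.com/kikossik/cs2-shadowpro | pipeline/steps/build_artifact.py | _sample_ticks
-- ===== SOURCE A (Python) =====
-- import bisect
--
-- def _nearest_tick(target_tick: int, available_ticks: list[int]) -> int:
--     idx = bisect.bisect_left(available_ticks, target_tick)
--     if idx <= 0:
--         return int(available_ticks[0])
--     if idx >= len(available_ticks):
--         return int(available_ticks[-1])
--     before = int(available_ticks[idx - 1])
--     after = int(available_ticks[idx])
--     return before if abs(target_tick - before) <= abs(after - target_tick) else after
--
-- def _sample_ticks(window_start: int, window_end: int, available_ticks: list[int], samples: int) -> list[int]: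
--     if samples <= 1:
--         return [_nearest_tick((window_start + window_end) // 2, available_ticks)]
--     sampled: list[int] = []
--     seen: set[int] = set()
--     span = max(0, window_end - window_start)
--     for idx in range(samples):
--         target = window_start + round(span * idx / (samples - 1))
--         tick = _nearest_tick(int(target), available_ticks)
--         if tick not in seen:
--             sampled.append(tick)
--             seen.add(tick)
--     return sampled
-- ===== SOURCE B (Python) =====
-- def _sample_ticks(window_start: int, window_end: int, available_ticks: list[int], samples: int) -> list[int]:
--     if samples <= 1:
--         targets = [(window_start + window_end) // 2]
--     else:
--         span = max(0, window_end - window_start)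
--         targets = [window_start + round(span * i / (samples - 1)) for i in range(samples)]
--
--     def pick(t: int, lo: int, hi: int) -> int:
--         # recursive binary descent handing back the chosen tick itself: the
--         # lo == hi leaf decides between the clamped straddling pair,
--         # favouring the earlier tick on a distance tie
--         if lo < hi:
--             mid = (lo + hi) // 2
--             return pick(t, mid + 1, hi) if available_ticks[mid] < t else pick(t, lo, mid)
--         if lo == 0:
--             return available_ticks[0]
--         if lo == len(available_ticks):
--             return available_ticks[-1]
--         before, after = available_ticks[lo - 1], available_ticks[lo]
--         return before if abs(t - before) <= abs(after - t) else after
--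
--     cache: dict[int, int] = {}
--     for t in targets:
--         if t not in cache:
--             cache[t] = pick(t, 0, len(available_ticks))
--     return list(dict.fromkeys(cache[t] for t in targets))
-- ===== Notes on version B (the rewrite author's own statement) =====
-- stated objective: alternative
-- what changed: B stages the work instead of A's single interleaved loop: it materialises the target list first, resolves each DISTINCT target only once through a memo dict (targets repeat whenever the span is smaller than the sample count), replaces the bisect call plus index-clamping branch chain by one hand-written recursive descent whose lo==hi leaf hands back the chosen tick directly, and ordered-dedups with dict.fromkeys instead of an incremental seen-set.
import Mathlib
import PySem

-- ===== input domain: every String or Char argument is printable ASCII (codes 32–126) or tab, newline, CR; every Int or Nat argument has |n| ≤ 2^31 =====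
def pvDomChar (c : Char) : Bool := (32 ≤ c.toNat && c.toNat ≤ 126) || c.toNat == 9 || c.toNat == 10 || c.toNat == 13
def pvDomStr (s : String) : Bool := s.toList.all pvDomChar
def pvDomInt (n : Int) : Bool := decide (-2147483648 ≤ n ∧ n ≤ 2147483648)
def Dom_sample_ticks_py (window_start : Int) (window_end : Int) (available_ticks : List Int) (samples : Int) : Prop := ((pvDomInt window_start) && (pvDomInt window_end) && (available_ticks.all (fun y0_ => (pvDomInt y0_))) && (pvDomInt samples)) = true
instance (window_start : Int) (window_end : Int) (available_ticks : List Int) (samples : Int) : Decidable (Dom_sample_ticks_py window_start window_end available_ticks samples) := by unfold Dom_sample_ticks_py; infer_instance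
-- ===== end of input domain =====

-- B stages the work: targets list first, one memo-dict entry per distinct target, each target
-- resolved by a recursive binary descent whose leaf returns the chosen tick, dict.fromkeys dedup.

-- Shared hand-port of CPython's  round(p / q)  for ints 0 ≤ p, 0 < q (the only way both Pythons
-- use it): int/int true division is the rational p/q correctly rounded to the nearest IEEE double
-- (53-bit mantissa, round-half-to-even), and round() then rounds that double half-to-even.
-- Exact on the stated domain (no subnormals/overflow there); validated against CPython by fuzzing.
def pyRoundHalfEven (a b : Int) : Int :=
  -- round-half-to-even of the rational a/b, for 0 ≤ a, 0 < b
  let q := PySem.Int.floordiv a b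
  let r := a - q * b
  if 2 * r < b then q
  else if b < 2 * r then q + 1
  else if PySem.Int.mod q 2 = 0 then q else q + 1

def pyRoundDiv (p q : Int) : Int :=
  if p = 0 then 0
  else
    -- mantissa/exponent of the double nearest to p/q: value = m * 2^e with 2^52 ≤ m < 2^53
    let e1 : Int := (PySem.Int.bitLength p : Int) - (PySem.Int.bitLength q : Int) - 53
    let m1 : Int := if 0 ≤ e1 then pyRoundHalfEven p (q * 2 ^ e1.toNat)
                    else pyRoundHalfEven (p * 2 ^ (-e1).toNat) q
    let e : Int := if m1 < 2 ^ 53 then e1 else e1 + 1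
    let m : Int := if m1 < 2 ^ 53 then m1
                   else if 0 ≤ e then pyRoundHalfEven p (q * 2 ^ e.toNat)
                   else pyRoundHalfEven (p * 2 ^ (-e).toNat) q
    -- round() of that double, half-to-even
    if 0 ≤ e then m * 2 ^ e.toNat else pyRoundHalfEven m (2 ^ (-e).toNat)

-- ===== PORT A =====
-- _nearest_tick; the pyGetD defaults are unreachable when available_ticks ≠ [] (Pre_)
def nearest_tick (target_tick : Int) (available_ticks : List Int) : Int :=
  let idx : Int := (PySem.List.bisectLeft available_ticks target_tick : Int)
  if idx ≤ 0 then PySem.List.pyGetD available_ticks 0 0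
  else if (available_ticks.length : Int) ≤ idx then PySem.List.pyGetD available_ticks (-1) 0
  else
    let before := PySem.List.pyGetD available_ticks (idx - 1) 0
    let after := PySem.List.pyGetD available_ticks idx 0
    if |target_tick - before| ≤ |after - target_tick| then before else after

def sample_ticks_py (window_start : Int) (window_end : Int) (available_ticks : List Int) (samples : Int) : List Int :=
  if samples ≤ 1 then
    [nearest_tick (PySem.Int.floordiv (window_start + window_end) 2) available_ticks]
  else
    let span := max 0 (window_end - window_start)
    let st := (PySem.List.pyRange 0 samples 1).foldl
      (fun (st : List Int × PySem.Set Int) idx =>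
        let target := window_start + pyRoundDiv (span * idx) (samples - 1)
        let tick := nearest_tick target available_ticks
        if PySem.Set.contains st.2 tick then st
        else (st.1 ++ [tick], PySem.Set.add st.2 tick))
      ([], PySem.Set.empty)
    st.1

-- ===== PORT B =====
-- Source B's pick: a recursive binary descent returning the chosen tick at its lo = hi leaf;
-- lo and hi stay in [0, length] (Python ints that never go negative), so Nat with Nat's
-- floor division is exact; the getD/pyGetD defaults are unreachable when ticks ≠ [] (Pre_)
def pick (ticks : List Int) (t : Int) (lo hi : Nat) : Int :=
  if h : lo < hi then
    if ticks.getD ((lo + hi) / 2) 0 < t then pick ticks t ((lo + hi) / 2 + 1) hi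
    else pick ticks t lo ((lo + hi) / 2)
  else if lo = 0 then ticks.getD 0 0
  else if lo = ticks.length then PySem.List.pyGetD ticks (-1) 0
  else
    let before := ticks.getD (lo - 1) 0
    let after := ticks.getD lo 0
    if |t - before| ≤ |after - t| then before else after
termination_by hi - lo
decreasing_by all_goals omega

def sample_ticks_py_alt (window_start : Int) (window_end : Int) (available_ticks : List Int) (samples : Int) : List Int :=
  let targets : List Int :=
    if samples ≤ 1 then [PySem.Int.floordiv (window_start + window_end) 2]
    else
      let span := max 0 (window_end - window_start)
      (PySem.List.pyRange 0 samples 1).map (fun i => window_start + pyRoundDiv (span * i) (samples - 1))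
  let cache := targets.foldl
    (fun (cache : PySem.Dict Int Int) t =>
      if PySem.Dict.contains cache t then cache
      else cache.insert t (pick available_ticks t 0 available_ticks.length))
    PySem.Dict.empty
  -- cache[t]: every t of targets is a key by then, so the KeyError default 0 is unreachable
  PySem.List.dedup (targets.map (fun t => PySem.Dict.getD cache t 0))

-- ===== PRECONDITION & SPEC =====
-- Pre_ excludes only the empty tick list, on which A raises IndexError (and B too)
def Pre_sample_ticks_py (window_start : Int) (window_end : Int) (available_ticks : List Int) (samples : Int) : Prop :=
  available_ticks ≠ []
instance (window_start : Int) (window_end : Int) (available_ticks : List Int) (samples : Int) : Decidable (Pre_sample_ticks_py window_start window_end available_ticks samples) := by unfold Pre_sample_ticks_py; infer_instance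

def pvWitness_sample_ticks_py : Int × Int × List Int × Int := (10, 30, [5, 12, 20, 28], 3)

def Spec_sample_ticks_py (window_start : Int) (window_end : Int) (available_ticks : List Int) (samples : Int) (out : List Int) : Prop := out = sample_ticks_py_alt window_start window_end available_ticks samples
instance (window_start : Int) (window_end : Int) (available_ticks : List Int) (samples : Int) (out : List Int) : Decidable (Spec_sample_ticks_py window_start window_end available_ticks samples out) := by unfold Spec_sample_ticks_py; infer_instance

-- ===== CLAIM (what is proved, stated in full; the proofs are below) =====
def Claim_equal_sample_ticks_py : Prop := ∀ (window_start : Int) (window_end : Int) (available_ticks : List Int) (samples : Int), Dom_sample_ticks_py window_start window_end available_ticks samples → Pre_sample_ticks_py window_start window_end available_ticks samples → Spec_sample_ticks_py window_start window_end available_ticks samples (sample_ticks_py window_start window_end available_ticks samples)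

-- ===== LEMMAS AND PROOFS =====

theorem bisectLeftLoop_le (xs : List Int) (x : Int) :
    ∀ (fuel lo hi : Nat), lo ≤ hi → PySem.List.bisectLeftLoop xs x fuel lo hi ≤ hi := by
  intro fuel
  induction fuel with
  | zero => intro lo hi h; simpa [PySem.List.bisectLeftLoop] using h
  | succ n ih =>
    intro lo hi h
    rw [PySem.List.bisectLeftLoop]
    by_cases hlh : lo < hi
    · simp only [hlh, if_pos]
      cases hx : xs[(lo + hi) / 2]? with
      | none => exact h
      | some y =>
        by_cases hy : y < x
        · simp only [hy, if_pos]; exact ih _ _ (by omega)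
        · simp only [hy, if_false]; exact le_trans (ih _ _ (by omega)) (by omega)
    · simp [hlh, h]

-- Source B's descent follows exactly bisect_left's midpoint path, then leaves at (idx, idx)
theorem pick_eq_loop (ticks : List Int) (t : Int) :
    ∀ (fuel lo hi : Nat), hi - lo ≤ fuel → lo ≤ hi → hi ≤ ticks.length →
      pick ticks t lo hi =
        pick ticks t (PySem.List.bisectLeftLoop ticks t fuel lo hi)
                     (PySem.List.bisectLeftLoop ticks t fuel lo hi) := by
  intro fuel
  induction fuel with
  | zero =>
    intro lo hi h1 h2 h3
    have hle : lo = hi := by omega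
    rw [PySem.List.bisectLeftLoop, hle]
  | succ n ih =>
    intro lo hi h1 h2 h3
    rw [PySem.List.bisectLeftLoop]
    by_cases hlh : lo < hi
    · simp only [hlh, if_pos]
      have hmid : (lo + hi) / 2 < ticks.length := by omega
      rw [List.getElem?_eq_getElem hmid]
      rw [pick]
      rw [dif_pos hlh]
      rw [List.getD_eq_getElem ticks 0 hmid]
      by_cases hy : ticks[(lo + hi) / 2] < t
      · simp only [hy, if_pos]
        exact ih ((lo + hi) / 2 + 1) hi (by omega) (by omega) h3
      · simp only [hy, if_false]
        exact ih lo ((lo + hi) / 2) (by omega) (by omega) (by omega)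
    · simp only [hlh, if_false]
      have hle : lo = hi := by omega
      rw [hle]

-- the leaf at the insertion point computes A's nearest_tick
theorem pick_eq_nearest (ticks : List Int) (t : Int) (hne : ticks ≠ []) :
    pick ticks t 0 ticks.length = nearest_tick t ticks := by
  have hn : 0 < ticks.length := List.length_pos_iff.mpr hne
  have hk : PySem.List.bisectLeft ticks t ≤ ticks.length := by
    simpa [PySem.List.bisectLeft] using
      bisectLeftLoop_le ticks t ticks.length 0 ticks.length (Nat.zero_le _)
  have hstep : pick ticks t 0 ticks.length =
      pick ticks t (PySem.List.bisectLeft ticks t) (PySem.List.bisectLeft ticks t) := by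
    simpa [PySem.List.bisectLeft] using
      pick_eq_loop ticks t ticks.length 0 ticks.length (by omega) (by omega) le_rfl
  rw [hstep]
  unfold nearest_tick
  dsimp only
  set k := PySem.List.bisectLeft ticks t with hkdef
  rw [pick, dif_neg (by omega : ¬ k < k)]
  by_cases hk0 : k = 0
  · rw [if_pos hk0]
    rw [if_pos (show ((k : Int) ≤ 0) from by exact_mod_cast hk0.le)]
    rw [PySem.List.pyGetD_zero]
  · rw [if_neg hk0]
    rw [if_neg (show ¬ ((k : Int) ≤ 0) from by exact_mod_cast (by omega : ¬ k ≤ 0))]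
    by_cases hkn : k = ticks.length
    · rw [if_pos hkn]
      rw [if_pos (show ((ticks.length : Int) ≤ (k : Int)) from by exact_mod_cast hkn.ge)]
    · rw [if_neg hkn]
      rw [if_neg (show ¬ ((ticks.length : Int) ≤ (k : Int)) from by
            exact_mod_cast (by omega : ¬ ticks.length ≤ k))]
      have hklt : k < ticks.length := lt_of_le_of_ne hk hkn
      have hbef : PySem.List.pyGetD ticks ((k : Int) - 1) 0 = ticks.getD (k - 1) 0 := by
        rw [PySem.List.pyGetD_eq_getElem ticks 0 (by omega) (by omega)]
        rw [List.getD_eq_getElem ticks 0 (by omega : k - 1 < ticks.length)]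
        simp only [show ((k : Int) - 1).toNat = k - 1 from by omega]
      have haft : PySem.List.pyGetD ticks (k : Int) 0 = ticks.getD k 0 := by
        rw [PySem.List.pyGetD_eq_getElem ticks 0 (by omega) (by omega)]
        rw [List.getD_eq_getElem ticks 0 hklt]
        simp only [Int.toNat_natCast]
      rw [hbef, haft]

-- the memo fold: every key of the cache holds f of itself, and every processed
-- target is a key; so looking a processed target up yields f of it
theorem cache_get (f : Int → Int) (l : List Int) :
    ∀ (d : PySem.Dict Int Int), (∀ x v, d.get? x = some v → v = f x) →
      ∀ x, (x ∈ l ∨ d.get? x = some (f x)) →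
        (l.foldl (fun d t => if PySem.Dict.contains d t then d else d.insert t (f t)) d).get? x
          = some (f x) := by
  induction l with
  | nil =>
    intro d hinv x hx
    rcases hx with h | h
    · cases h
    · exact h
  | cons t rest ih =>
    intro d hinv x hx
    rw [List.foldl_cons]
    set d' := if PySem.Dict.contains d t then d else d.insert t (f t) with hd'
    have hinv' : ∀ x v, d'.get? x = some v → v = f x := by
      intro y v hy
      rw [hd'] at hy
      by_cases hc : PySem.Dict.contains d t
      · rw [if_pos hc] at hy; exact hinv y v hy
      · rw [if_neg hc, PySem.Dict.get?_insert] at hy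
        by_cases hyt : y = t
        · rw [if_pos hyt] at hy; rw [hyt]; exact (Option.some_inj.mp hy).symm
        · rw [if_neg hyt] at hy; exact hinv y v hy
    have ht : d'.get? t = some (f t) := by
      rw [hd']
      by_cases hc : PySem.Dict.contains d t
      · rw [if_pos hc]
        have hsome : (d.get? t).isSome := by
          rw [← PySem.Dict.contains_eq_isSome_get?]; exact hc
        obtain ⟨v, hv⟩ := Option.isSome_iff_exists.mp hsome
        rw [hv, hinv t v hv]
      · rw [if_neg hc]; exact PySem.Dict.get?_insert_self d t (f t)
    rcases hx with h | h
    · rcases List.mem_cons.mp h with h | h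
      · exact ih d' hinv' x (Or.inr (h ▸ ht))
      · exact ih d' hinv' x (Or.inl h)
    · refine ih d' hinv' x (Or.inr ?_)
      rw [hd']
      by_cases hc : PySem.Dict.contains d t
      · rw [if_pos hc]; exact h
      · rw [if_neg hc, PySem.Dict.get?_insert]
        by_cases hyt : x = t
        · rw [if_pos hyt, hyt]
        · rw [if_neg hyt]; exact h

-- A's pair fold (list + seen set) projects to an ordered-dedup fold of the picks
theorem foldl_diag (f : Int → Int) (l : List Int) :
    ∀ (s : List Int),
      (l.foldl
        (fun (st : List Int × PySem.Set Int) x =>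
          let tick := f x
          if PySem.Set.contains st.2 tick then st
          else (st.1 ++ [tick], PySem.Set.add st.2 tick))
        (s, s)).1 = (l.map f).foldl PySem.Set.add s := by
  induction l with
  | nil => intro s; rfl
  | cons x l ih =>
    intro s
    by_cases hm : f x ∈ s
    · simpa [List.foldl, PySem.Set.contains, PySem.Set.add, hm] using ih s
    · simpa [List.foldl, PySem.Set.contains, PySem.Set.add, hm] using ih (s ++ [f x])

-- B's cache lookups over its own targets are exactly the picks (= A's nearest ticks)
theorem map_cache (ticks : List Int) (hne : ticks ≠ []) (targets : List Int) :
    targets.map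
      (fun t => PySem.Dict.getD
        (targets.foldl
          (fun (cache : PySem.Dict Int Int) t =>
            if PySem.Dict.contains cache t then cache
            else cache.insert t (pick ticks t 0 ticks.length))
          PySem.Dict.empty) t 0)
    = targets.map (fun t => nearest_tick t ticks) := by
  apply List.map_congr_left
  intro x hx
  have hget := cache_get (fun t => pick ticks t 0 ticks.length) targets PySem.Dict.empty
    (by intro y v hy; rw [PySem.Dict.get?_empty] at hy; cases hy) x (Or.inl hx)
  dsimp only at hget
  rw [PySem.Dict.getD_of_get?_eq_some _ 0 hget, pick_eq_nearest ticks x hne]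

-- ===== VERDICT (by name: the statement is the Claim_ definition above) =====
theorem sample_ticks_py_spec : Claim_equal_sample_ticks_py := by
  intro ws we ticks samples _hdom hpre
  unfold Spec_sample_ticks_py sample_ticks_py sample_ticks_py_alt
  by_cases hsa : samples ≤ 1
  · rw [if_pos hsa, if_pos hsa]
    dsimp only
    rw [map_cache ticks hpre]
    rfl
  · rw [if_neg hsa, if_neg hsa]
    dsimp only
    rw [map_cache ticks hpre, List.map_map]
    rw [PySem.List.dedup_eq_ofList, PySem.Set.ofList_eq_foldl]
    exact foldl_diag _ _ []
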